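-- pv_equiv track=rewrite | github.com/brian-rieder/computer-security | FiniteFields/Rieder_Field.py | has_MI
-- ===== SOURCE A (Python) =====
-- def has_MI(num, mod):
--     """
--     Determines whether the input number has a multiplicative inverse under the input modulus.
--     :param num: Number to check
--     :param mod: Modulus under which MI may exit
--     :return: Boolean indicating if num has a MI under mod
--     """
--     x, x_old = 0, 1
--     y, y_old = 1, 0
--     while mod:
--         q = num // mod
--         num, mod = mod, num % mod
--         x, x_old = x_old - q * x, x
--         y, y_old = y_old - q * y, y
--     if num != 1:
--         return False
--     else:
--         return True
-- ===== SOURCE B (Python) =====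
-- def has_MI(num, mod):
--     """Check if num has a multiplicative inverse mod mod: true iff gcd (via Euclid with Python's %) is 1."""
--     def g(a, b):
--         return a if b == 0 else g(b, a % b)
--     return g(num, mod) == 1
-- ===== Notes on version B (the rewrite author's own statement) =====
-- stated objective: simpler
-- what changed: Replaced the iterative extended-Euclid loop carrying dead x/y cofactors with a plain recursive gcd helper using Python's % (matching A's sign behavior), returning gcd == 1.
import Mathlib
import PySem

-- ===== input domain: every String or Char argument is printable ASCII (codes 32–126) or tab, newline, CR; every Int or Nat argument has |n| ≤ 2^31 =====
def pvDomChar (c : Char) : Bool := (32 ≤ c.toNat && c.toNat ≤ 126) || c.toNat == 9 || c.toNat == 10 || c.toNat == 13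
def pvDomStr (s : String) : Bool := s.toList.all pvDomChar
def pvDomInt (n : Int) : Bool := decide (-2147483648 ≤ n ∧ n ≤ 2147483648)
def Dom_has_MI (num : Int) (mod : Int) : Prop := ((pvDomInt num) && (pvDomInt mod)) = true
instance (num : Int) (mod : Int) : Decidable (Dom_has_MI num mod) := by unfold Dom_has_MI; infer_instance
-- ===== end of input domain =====

-- B replaces A's iterative extended-Euclid loop (with dead x/y cofactors) by a plain recursive gcd using Python's %; simpler, same behaviour.


-- used by both ports' termination proofs
theorem pvModNatAbsLt (a b : Int) (hb : b ≠ 0) : (PySem.Int.mod a b).natAbs < b.natAbs := by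
  rcases lt_or_gt_of_ne hb with h | h
  · have := PySem.Int.mod_neg_bounds a h
    omega
  · have h1 := PySem.Int.mod_nonneg a h
    have h2 := PySem.Int.mod_lt a h
    omega

-- ===== PORT A =====
-- the while loop of A, carrying all its state (num, mod, x, x_old, y, y_old)
def hasMILoop (num mod x x_old y y_old : Int) : Bool :=
  if hm : mod = 0 then
    -- after the loop: 'return False if num != 1 else True'
    if num ≠ 1 then false else true
  else
    let q := PySem.Int.floordiv num mod
    hasMILoop mod (PySem.Int.mod num mod) (x_old - q * x) x (y_old - q * y) y
termination_by mod.natAbs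
decreasing_by exact pvModNatAbsLt num mod hm

def has_MI (num : Int) (mod : Int) : Bool :=
  hasMILoop num mod 0 1 1 0

-- ===== PORT B =====
-- recursive gcd with Python's % semantics
def pyGcdRec (a b : Int) : Int :=
  if hb : b = 0 then a else pyGcdRec b (PySem.Int.mod a b)
termination_by b.natAbs
decreasing_by exact pvModNatAbsLt a b hb

def has_MI_alt (num : Int) (mod : Int) : Bool :=
  pyGcdRec num mod == 1

-- ===== PRECONDITION & SPEC =====
def Spec_has_MI (num : Int) (mod : Int) (out : Bool) : Prop := out = has_MI_alt num mod
instance (num : Int) (mod : Int) (out : Bool) : Decidable (Spec_has_MI num mod out) := by unfold Spec_has_MI; infer_instance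

-- ===== CLAIM (what is proved, stated in full; the proofs are below) =====
def Claim_equal_has_MI : Prop := ∀ (num : Int) (mod : Int), Dom_has_MI num mod → Spec_has_MI num mod (has_MI num mod)

-- ===== LEMMAS AND PROOFS =====
-- the cofactors x, x_old, y, y_old are dead: the loop's result is (gcd == 1)
theorem hasMILoop_eq_gcd (num mod x x_old y y_old : Int) :
    hasMILoop num mod x x_old y y_old = (pyGcdRec num mod == 1) := by
  by_cases hm : mod = 0
  · rw [hasMILoop, pyGcdRec]
    simp [hm]
    by_cases h1 : num = 1 <;> simp [h1]
  · rw [hasMILoop, pyGcdRec]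
    simp only [hm, dite_false]
    exact hasMILoop_eq_gcd mod (PySem.Int.mod num mod) _ _ _ _
termination_by mod.natAbs
decreasing_by exact pvModNatAbsLt num mod hm

-- ===== VERDICT (by name: the statement is the Claim_ definition above) =====
theorem has_MI_spec : Claim_equal_has_MI := by
  intro num mod _
  unfold Spec_has_MI has_MI has_MI_alt
  exact hasMILoop_eq_gcd num mod 0 1 1 0
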